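-- pv_equiv track=rewrite | github.com/compat-project/QCG-PilotJob | src/qcg/appscheduler/environment.py | __checkSameCores
-- ===== SOURCE A (Python) =====
-- def __checkSameCores(tasksList):
--     same = None
--
--     for t in tasksList.split(','):
--         if same is not None:
--             if t != same:
--                 return None
--         else:
--             same = t
--
--     return same
-- ===== SOURCE B (Python) =====
-- def __checkSameCores(tasksList):
--     tokens = tasksList.split(',')
--     s = set(tokens)
--     return tokens[0] if len(s) == 1 else None
-- ===== Notes on version B (the rewrite author's own statement) =====
-- stated objective: idiomatic
-- what changed: Replaces the sentinel-and-early-exit scan with one split, a distinct-token set and a cardinality test, returning the first token when the set is a singleton.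
import Mathlib
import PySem

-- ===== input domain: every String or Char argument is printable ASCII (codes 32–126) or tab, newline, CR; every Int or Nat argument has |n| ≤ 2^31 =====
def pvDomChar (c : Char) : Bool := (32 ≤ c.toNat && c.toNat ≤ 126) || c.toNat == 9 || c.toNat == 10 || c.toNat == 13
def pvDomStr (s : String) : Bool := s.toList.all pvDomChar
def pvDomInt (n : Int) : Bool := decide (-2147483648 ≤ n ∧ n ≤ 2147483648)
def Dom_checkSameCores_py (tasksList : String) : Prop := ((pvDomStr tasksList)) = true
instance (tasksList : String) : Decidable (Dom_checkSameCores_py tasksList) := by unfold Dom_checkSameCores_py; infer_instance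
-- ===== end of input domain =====

-- B replaces A's sentinel scan with a split-once + distinct-token set + cardinality test (idiomatic, not claimed faster).
-- ===== PORT A =====
-- loop of A: 'same' sentinel, compare each token, early exit on mismatch
def checkAcc (same : Option String) : List String → Option String
  | [] => same
  | t :: rest =>
    match same with
    | some s => if t ≠ s then none else checkAcc (some s) rest
    | none => checkAcc (some t) rest

-- tasksList.split(',') : sep is the nonempty literal ",", so split? is always some; getD [] is unreachable
def checkSameCores_py (tasksList : String) : Option String :=
  checkAcc none ((PySem.Str.split? tasksList ",").getD [])

-- ===== PORT B =====
def checkSameCores_py_alt (tasksList : String) : Option String :=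
  let tokens := (PySem.Str.split? tasksList ",").getD []
  let s : PySem.Set String := PySem.Set.ofList tokens
  if PySem.Set.len s = 1 then PySem.List.pyGet? tokens 0 else none

-- ===== PRECONDITION & SPEC =====
def Spec_checkSameCores_py (tasksList : String) (out : Option String) : Prop := out = checkSameCores_py_alt tasksList
instance (tasksList : String) (out : Option String) : Decidable (Spec_checkSameCores_py tasksList out) := by unfold Spec_checkSameCores_py; infer_instance

-- ===== CLAIM (what is proved, stated in full; the proofs are below) =====
def Claim_equal_checkSameCores_py : Prop := ∀ (tasksList : String), Dom_checkSameCores_py tasksList → Spec_checkSameCores_py tasksList (checkSameCores_py tasksList)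

-- ===== LEMMAS AND PROOFS =====
theorem checkAcc_some (s : String) (l : List String) :
    checkAcc (some s) l = if l.all (fun t => t == s) then some s else none := by
  induction l with
  | nil => simp [checkAcc]
  | cons t rest ih =>
    by_cases h : t = s <;> simp [checkAcc, h, ih]

theorem ofList_const (t : String) (rest : List String) (h : ∀ x ∈ rest, x = t) :
    PySem.Set.ofList (t :: rest) = [t] := by
  have base : PySem.Set.ofList (t :: rest) = rest.foldl PySem.Set.add [t] := by
    simp [PySem.Set.ofList_eq_foldl, List.foldl_cons, PySem.Set.add]
  rw [base]
  clear base
  induction rest with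
  | nil => rfl
  | cons x rs ih =>
    have hx : x = t := h x (by simp)
    have hadd : PySem.Set.add [t] x = [t] := by
      simp [PySem.Set.add, hx, PySem.Set.contains]
    rw [List.foldl_cons, hadd]
    exact ih (fun y hy => h y (by simp [hy]))

theorem checkAcc_eq_alt (l : List String) :
    checkAcc none l =
      (if PySem.Set.len (PySem.Set.ofList l) = 1 then PySem.List.pyGet? l 0 else none) := by
  cases l with
  | nil => simp [checkAcc, PySem.Set.ofList, PySem.Set.len]
  | cons t rest =>
    rw [checkAcc, checkAcc_some]
    by_cases hall : ∀ x ∈ rest, x = t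
    · have hof := ofList_const t rest hall
      have : rest.all (fun x => x == t) = true := by
        simp [List.all_eq_true]; exact fun x hx => hall x hx
      simp [this, hof, PySem.Set.len, PySem.List.pyGet?, PySem.List.pyIdx?]
    · rw [not_forall] at hall
      simp only [not_forall, exists_prop] at hall
      obtain ⟨x, hx, hxt⟩ := hall
      have hne : rest.all (fun y => y == t) = false := by
        simp [List.all_eq_false]; exact ⟨x, hx, hxt⟩
      have hlen : List.length (PySem.Set.ofList (t :: rest)) ≠ 1 := by
        intro hcard
        obtain ⟨y, hy⟩ := List.length_eq_one_iff.mp hcard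
        have hxm : x ∈ PySem.Set.ofList (t :: rest) := by
          rw [PySem.Set.mem_ofList]; simp [hx]
        have htm : t ∈ PySem.Set.ofList (t :: rest) := by
          rw [PySem.Set.mem_ofList]; simp
        rw [hy] at hxm htm
        simp at hxm htm
        exact hxt (hxm.trans htm.symm)
      simp [hne, PySem.Set.len, hlen]

-- ===== VERDICT (by name: the statement is the Claim_ definition above) =====
theorem checkSameCores_py_spec : Claim_equal_checkSameCores_py := by
  intro tasksList _
  unfold Spec_checkSameCores_py checkSameCores_py checkSameCores_py_alt
  exact checkAcc_eq_alt _
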